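-- pv_equiv track=rewrite | github.com/AvrilMZ/Teoria_de_Algoritmos | TP2/src/solucion.py | rec
-- ===== SOURCE A (Python) =====
-- ATACAR = "Atacar"
--
-- CARGAR = "Cargar"
--
-- def crear_m(enemigos: list[int], calcular_muertos: list[int]):
-- 	M = [0] * (len(enemigos) + 1)
-- 	for ultima_oleada in range(1, len(enemigos) + 1):
-- 		# Puedo no haber atacado nunca
-- 		maximo = min(calcular_muertos[ultima_oleada - 1], enemigos[ultima_oleada - 1])
-- 		# O, habiendo atacado antes, atacar
-- 		for ultimo_ataque in range(1, ultima_oleada):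
-- 			muertos = M[ultimo_ataque] + min(calcular_muertos[ultima_oleada-ultimo_ataque - 1], enemigos[ultima_oleada - 1])
-- 			if muertos > maximo:
-- 				maximo = muertos
-- 		M[ultima_oleada] = maximo
-- 	return M
--
-- def rec(enemigos: list[int], calcular_muertos: list[int]):
-- 	M = crear_m(enemigos, calcular_muertos)
--
-- 	oleada_actual = len(enemigos)
-- 	acciones = []
-- 	while oleada_actual > 0:
-- 		valor_no_atacar = min(calcular_muertos[oleada_actual - 1], enemigos[oleada_actual - 1])
-- 		ultimo_ataque = 0
--
-- 		for posible_ultimo_ataque in range(1, oleada_actual):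
-- 			valor_atacar = M[posible_ultimo_ataque] + min(calcular_muertos[oleada_actual - posible_ultimo_ataque - 1], enemigos[oleada_actual - 1])
-- 			if valor_atacar > valor_no_atacar:
-- 				valor_no_atacar = valor_atacar
-- 				ultimo_ataque = posible_ultimo_ataque
--
-- 		num_cargas = oleada_actual - ultimo_ataque - 1 # Cantidad de cargas necesarias antes de atacar
-- 		if num_cargas < 0:
-- 			num_cargas = 0
--
-- 		acciones.append(ATACAR)
-- 		for _ in range(num_cargas):
-- 			acciones.append(CARGAR)
--
-- 		oleada_actual = ultimo_ataque
--
-- 	acciones.reverse()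
-- 	return acciones, M[len(enemigos)]
-- ===== SOURCE B (Python) =====
-- ATACAR = "Atacar"
--
-- CARGAR = "Cargar"
--
-- def rec(enemigos, calcular_muertos):
-- 	n = len(enemigos)
-- 	M = [0] * (n + 1)
-- 	padre = [0] * (n + 1)
-- 	for i in range(1, n + 1):
-- 		maximo = min(calcular_muertos[i - 1], enemigos[i - 1])
-- 		mejor = 0
-- 		for j in range(1, i):
-- 			muertos = M[j] + min(calcular_muertos[i - j - 1], enemigos[i - 1])
-- 			if muertos > maximo:
-- 				maximo = muertos
-- 				mejor = j
-- 		M[i] = maximo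
-- 		padre[i] = mejor
-- 	acciones = []
-- 	i = n
-- 	while i > 0:
-- 		p = padre[i]
-- 		acciones.append(ATACAR)
-- 		acciones.extend([CARGAR] * (i - p - 1))
-- 		i = p
-- 	acciones.reverse()
-- 	return acciones, M[n]
-- ===== Notes on version B (the rewrite author's own statement) =====
-- stated objective: alternative
-- what changed: B records a parent (argmax) array while filling the DP table and reconstructs the action list by following parent pointers in one O(n) pass, instead of A's re-running the full argmax scan over M at every step of the reconstruction loop; total cost stays dominated by the O(n^2) DP fill.
import Mathlib
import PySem

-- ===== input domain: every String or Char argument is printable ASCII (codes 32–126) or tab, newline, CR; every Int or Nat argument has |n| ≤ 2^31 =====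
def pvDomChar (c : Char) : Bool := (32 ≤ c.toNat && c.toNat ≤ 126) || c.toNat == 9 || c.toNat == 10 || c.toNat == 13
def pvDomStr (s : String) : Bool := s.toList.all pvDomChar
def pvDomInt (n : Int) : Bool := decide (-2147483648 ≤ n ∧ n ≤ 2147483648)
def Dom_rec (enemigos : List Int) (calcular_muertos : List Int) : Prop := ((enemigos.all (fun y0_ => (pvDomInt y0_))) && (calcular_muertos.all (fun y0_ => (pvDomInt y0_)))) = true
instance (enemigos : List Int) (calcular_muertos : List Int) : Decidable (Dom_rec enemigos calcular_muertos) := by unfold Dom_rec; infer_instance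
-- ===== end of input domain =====

-- B replaces A's per-step argmax rescans of the DP table during reconstruction by a
-- parent array filled alongside the DP fill, then follows parent pointers (objective: alternative reconstruction strategy).

-- ===== PORT A =====

-- crear_m: M = [0]*(n+1); outer loop assigns M[ultima_oleada] (pySetD), inner loop maximises.
def crearMStep (enemigos calcular_muertos : List Int) (M : List Int) (uo : Int) : List Int :=
  let maximo := min (PySem.List.pyGetD calcular_muertos (uo - 1) 0) (PySem.List.pyGetD enemigos (uo - 1) 0)
  let maximo := (PySem.List.pyRange 1 uo 1).foldl (fun maximo ua =>
    let muertos := PySem.List.pyGetD M ua 0 +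
      min (PySem.List.pyGetD calcular_muertos (uo - ua - 1) 0) (PySem.List.pyGetD enemigos (uo - 1) 0)
    if muertos > maximo then muertos else maximo) maximo
  PySem.List.pySetD M uo maximo

def crear_m (enemigos calcular_muertos : List Int) : List Int :=
  (PySem.List.pyRange 1 ((enemigos.length : Int) + 1) 1).foldl (crearMStep enemigos calcular_muertos)
    (List.replicate (enemigos.length + 1) 0)

-- A's while loop; the pair carries (valor_no_atacar, ultimo_ataque). Fuel n+1 suffices:
-- each iteration strictly decreases oleada_actual (ultimo_ataque < oleada_actual always).
def recLoopA (M enemigos calcular_muertos : List Int) : Nat → Int → List String → List String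
  | 0, _, acciones => acciones
  | fuel + 1, oleada, acciones =>
    if oleada > 0 then
      let st := (PySem.List.pyRange 1 oleada 1).foldl (fun (st : Int × Int) pa =>
        let va := PySem.List.pyGetD M pa 0 +
          min (PySem.List.pyGetD calcular_muertos (oleada - pa - 1) 0) (PySem.List.pyGetD enemigos (oleada - 1) 0)
        if va > st.1 then (va, pa) else st)
        (min (PySem.List.pyGetD calcular_muertos (oleada - 1) 0) (PySem.List.pyGetD enemigos (oleada - 1) 0), 0)
      let num_cargas := oleada - st.2 - 1
      let num_cargas := if num_cargas < 0 then 0 else num_cargas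
      -- append ATACAR then num_cargas copies of CARGAR
      recLoopA M enemigos calcular_muertos fuel st.2
        ((acciones ++ ["Atacar"]) ++ List.replicate num_cargas.toNat "Cargar")
    else acciones

def rec (enemigos : List Int) (calcular_muertos : List Int) : List String × Int :=
  let M := crear_m enemigos calcular_muertos
  let acciones := recLoopA M enemigos calcular_muertos (enemigos.length + 1) (enemigos.length : Int) []
  (acciones.reverse, PySem.List.pyGetD M (enemigos.length : Int) 0)

-- ===== PORT B =====

-- B's DP fill: same table M plus a parent table; the inner fold carries (maximo, mejor).
def crearMPStep (enemigos calcular_muertos : List Int) (MP : List Int × List Int) (i : Int) : List Int × List Int :=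
  let best := (PySem.List.pyRange 1 i 1).foldl (fun (st : Int × Int) j =>
    let muertos := PySem.List.pyGetD MP.1 j 0 +
      min (PySem.List.pyGetD calcular_muertos (i - j - 1) 0) (PySem.List.pyGetD enemigos (i - 1) 0)
    if muertos > st.1 then (muertos, j) else st)
    (min (PySem.List.pyGetD calcular_muertos (i - 1) 0) (PySem.List.pyGetD enemigos (i - 1) 0), 0)
  (PySem.List.pySetD MP.1 i best.1, PySem.List.pySetD MP.2 i best.2)

def crearMP (enemigos calcular_muertos : List Int) : List Int × List Int :=
  (PySem.List.pyRange 1 ((enemigos.length : Int) + 1) 1).foldl (crearMPStep enemigos calcular_muertos)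
    (List.replicate (enemigos.length + 1) 0, List.replicate (enemigos.length + 1) 0)

-- B's reconstruction: follow parent pointers. Fuel n+1 suffices (padre[i] < i).
def recLoopB (padre : List Int) : Nat → Int → List String → List String
  | 0, _, acc => acc
  | fuel + 1, i, acc =>
    if i > 0 then
      let p := PySem.List.pyGetD padre i 0
      recLoopB padre fuel p ((acc ++ ["Atacar"]) ++ List.replicate (i - p - 1).toNat "Cargar")
    else acc

def rec_alt (enemigos : List Int) (calcular_muertos : List Int) : List String × Int :=
  let MP := crearMP enemigos calcular_muertos
  ((recLoopB MP.2 (enemigos.length + 1) (enemigos.length : Int) []).reverse,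
    PySem.List.pyGetD MP.1 (enemigos.length : Int) 0)

-- ===== PRECONDITION & SPEC =====
-- Python A raises IndexError exactly when calcular_muertos is shorter than enemigos
-- (it reads calcular_muertos[i-1] for every wave i); B raises on the same inputs.
def Pre_rec (enemigos : List Int) (calcular_muertos : List Int) : Prop :=
  enemigos.length ≤ calcular_muertos.length
instance (enemigos : List Int) (calcular_muertos : List Int) : Decidable (Pre_rec enemigos calcular_muertos) := by unfold Pre_rec; infer_instance

def pvWitness_rec : List Int × List Int := ([3, 5, 2], [2, 4, 9])

def Spec_rec (enemigos : List Int) (calcular_muertos : List Int) (out : List String × Int) : Prop := out = rec_alt enemigos calcular_muertos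
instance (enemigos : List Int) (calcular_muertos : List Int) (out : List String × Int) : Decidable (Spec_rec enemigos calcular_muertos out) := by unfold Spec_rec; infer_instance

-- ===== CLAIM (what is proved, stated in full; the proofs are below) =====
def Claim_equal_rec : Prop := ∀ (enemigos : List Int) (calcular_muertos : List Int), Dom_rec enemigos calcular_muertos → Pre_rec enemigos calcular_muertos → Spec_rec enemigos calcular_muertos (rec enemigos calcular_muertos)

-- ===== LEMMAS AND PROOFS =====

-- The argmax scan both programs perform at wave i over table M (A inside the
-- reconstruction loop, B inside the DP fill).
def scanAt (M enemigos calcular_muertos : List Int) (i : Int) : Int × Int :=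
  (PySem.List.pyRange 1 i 1).foldl (fun (st : Int × Int) pa =>
    let va := PySem.List.pyGetD M pa 0 +
      min (PySem.List.pyGetD calcular_muertos (i - pa - 1) 0) (PySem.List.pyGetD enemigos (i - 1) 0)
    if va > st.1 then (va, pa) else st)
    (min (PySem.List.pyGetD calcular_muertos (i - 1) 0) (PySem.List.pyGetD enemigos (i - 1) 0), 0)

-- fst of the pair-carrying fold is A's value-only fold
theorem pairfold_fst (l : List Int) (f : Int → Int) :
    ∀ (m a : Int),
      (l.foldl (fun (st : Int × Int) j => if f j > st.1 then (f j, j) else st) (m, a)).1 =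
        l.foldl (fun m j => if f j > m then f j else m) m := by
  induction l with
  | nil => intro m a; rfl
  | cons x xs ih =>
    intro m a
    simp only [List.foldl_cons]
    by_cases h : f x > m
    · simp [h, ih]
    · simp [h, ih]

-- the argmax of the scan lies in [0, i)
theorem scanAt_snd_bound (M enemigos calcular_muertos : List Int) (i : Int) (hi : 0 < i) :
    0 ≤ (scanAt M enemigos calcular_muertos i).2 ∧ (scanAt M enemigos calcular_muertos i).2 < i := by
  unfold scanAt
  have key : ∀ (l : List Int), (∀ x ∈ l, 0 ≤ x ∧ x < i) →
      ∀ (st : Int × Int), 0 ≤ st.2 → st.2 < i →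
      0 ≤ (l.foldl (fun (st : Int × Int) pa =>
        let va := PySem.List.pyGetD M pa 0 +
          min (PySem.List.pyGetD calcular_muertos (i - pa - 1) 0) (PySem.List.pyGetD enemigos (i - 1) 0)
        if va > st.1 then (va, pa) else st) st).2 ∧
      (l.foldl (fun (st : Int × Int) pa =>
        let va := PySem.List.pyGetD M pa 0 +
          min (PySem.List.pyGetD calcular_muertos (i - pa - 1) 0) (PySem.List.pyGetD enemigos (i - 1) 0)
        if va > st.1 then (va, pa) else st) st).2 < i := by
    intro l
    induction l with
    | nil => intro _ st h0 h1; exact ⟨h0, h1⟩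
    | cons x xs ih =>
      intro hmem st h0 h1
      simp only [List.foldl_cons]
      have hx := hmem x (List.mem_cons_self ..)
      by_cases h : (PySem.List.pyGetD M x 0 +
          min (PySem.List.pyGetD calcular_muertos (i - x - 1) 0) (PySem.List.pyGetD enemigos (i - 1) 0)) > st.1
      · simp only [h, if_pos]
        exact ih (fun y hy => hmem y (List.mem_cons_of_mem _ hy)) _ hx.1 hx.2
      · simp only [h, if_false]
        exact ih (fun y hy => hmem y (List.mem_cons_of_mem _ hy)) st h0 h1
  exact key _ (fun x hx => by
    have := (PySem.List.mem_pyRange_one).1 hx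
    omega) (_, 0) le_rfl hi

-- the scan reads M only at indices 1 ≤ j < i
theorem scanAt_congr (M₁ M₂ enemigos calcular_muertos : List Int) (i : Int)
    (h : ∀ j : Int, 1 ≤ j → j < i → PySem.List.pyGetD M₁ j 0 = PySem.List.pyGetD M₂ j 0) :
    scanAt M₁ enemigos calcular_muertos i = scanAt M₂ enemigos calcular_muertos i := by
  unfold scanAt
  apply PySem.List.foldl_congr_mem
  intro st pa hpa
  have := (PySem.List.mem_pyRange_one).1 hpa
  rw [h pa this.1 this.2]

-- reading / preserving entries through pySetD at an in-range Int index
theorem pyGetD_pySetD_int (M : List Int) (a j v : Int) (ha0 : 0 ≤ a) (ha : a < (M.length : Int))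
    (hj0 : 0 ≤ j) :
    PySem.List.pyGetD (PySem.List.pySetD M a v) j 0 = if j = a then v else PySem.List.pyGetD M j 0 := by
  rw [PySem.List.pySetD_of_nonneg M v ha0, PySem.List.pyGetD_of_nonneg _ _ hj0,
    PySem.List.pyGetD_of_nonneg _ _ hj0]
  by_cases hj : j = a
  · subst hj
    have hlt : j.toNat < M.length := by omega
    simp [List.getD, hlt]
  · have hne : j.toNat ≠ a.toNat := by omega
    simp [List.getD, hj, Ne.symm hne]

theorem length_pySetD_int (M : List Int) (a v : Int) :
    (PySem.List.pySetD M a v).length = M.length := PySem.List.length_pySetD ..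

-- DP invariant: running the fill from wave a onward yields tables of unchanged length in
-- which, for every wave i already filled, the scan over the final M table returns (M[i], padre[i]).
theorem dp_inv (enemigos calcular_muertos : List Int) (n : Nat) :
    ∀ (k : Nat) (a : Int) (M P : List Int), 1 ≤ a → a + k = (n : Int) + 1 →
      M.length = n + 1 → P.length = n + 1 →
      (∀ i : Int, 1 ≤ i → i < a →
        scanAt M enemigos calcular_muertos i = (PySem.List.pyGetD M i 0, PySem.List.pyGetD P i 0)) →
      ((PySem.List.pyRange a ((n : Int) + 1) 1).foldl (crearMPStep enemigos calcular_muertos) (M, P)).1.length = n + 1 ∧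
      ((PySem.List.pyRange a ((n : Int) + 1) 1).foldl (crearMPStep enemigos calcular_muertos) (M, P)).2.length = n + 1 ∧
      (∀ i : Int, 1 ≤ i → i < (n : Int) + 1 →
        scanAt ((PySem.List.pyRange a ((n : Int) + 1) 1).foldl (crearMPStep enemigos calcular_muertos) (M, P)).1
            enemigos calcular_muertos i =
          (PySem.List.pyGetD ((PySem.List.pyRange a ((n : Int) + 1) 1).foldl (crearMPStep enemigos calcular_muertos) (M, P)).1 i 0,
           PySem.List.pyGetD ((PySem.List.pyRange a ((n : Int) + 1) 1).foldl (crearMPStep enemigos calcular_muertos) (M, P)).2 i 0)) := by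
  intro k
  induction k with
  | zero =>
    intro a M P ha hak hM hP hinv
    have hnil : PySem.List.pyRange a ((n : Int) + 1) 1 = [] := PySem.List.pyRange_one_eq_nil (by omega)
    rw [hnil]
    exact ⟨hM, hP, fun i h1 h2 => hinv i h1 (by omega)⟩
  | succ k ih =>
    intro a M P ha hak hM hP hinv
    have hcons : PySem.List.pyRange a ((n : Int) + 1) 1 = a :: PySem.List.pyRange (a + 1) ((n : Int) + 1) 1 :=
      PySem.List.pyRange_one_cons (by omega)
    rw [hcons]
    simp only [List.foldl_cons]
    have halt : a < (M.length : Int) := by omega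
    have halt' : a < (P.length : Int) := by omega
    set M' := (PySem.List.pySetD M a (scanAt M enemigos calcular_muertos a).1) with hM'def
    set P' := (PySem.List.pySetD P a (scanAt M enemigos calcular_muertos a).2) with hP'def
    have hstep : crearMPStep enemigos calcular_muertos (M, P) a = (M', P') := rfl
    rw [hstep]
    -- entries of M' at indices < a (and ≠ a) agree with M
    have hpres : ∀ j : Int, 0 ≤ j → j ≠ a → PySem.List.pyGetD M' j 0 = PySem.List.pyGetD M j 0 := by
      intro j hj0 hj
      rw [hM'def, pyGetD_pySetD_int M a j _ (by omega) halt hj0, if_neg hj]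
    have hpresP : ∀ j : Int, 0 ≤ j → j ≠ a → PySem.List.pyGetD P' j 0 = PySem.List.pyGetD P j 0 := by
      intro j hj0 hj
      rw [hP'def, pyGetD_pySetD_int P a j _ (by omega) halt' hj0, if_neg hj]
    have hscan' : ∀ i : Int, 1 ≤ i → i ≤ a →
        scanAt M' enemigos calcular_muertos i = scanAt M enemigos calcular_muertos i := by
      intro i h1 h2
      exact scanAt_congr _ _ _ _ _ (fun j hj1 hj2 => hpres j (by omega) (by omega))
    apply ih (a + 1) M' P' (by omega) (by omega)
      (by rw [hM'def, length_pySetD_int]; exact hM)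
      (by rw [hP'def, length_pySetD_int]; exact hP)
    intro i h1 h2
    by_cases hia : i = a
    · subst hia
      rw [hscan' i h1 le_rfl]
      rw [hM'def, pyGetD_pySetD_int M i _ _ (by omega) halt (by omega), if_pos rfl]
      rw [hP'def, pyGetD_pySetD_int P i _ _ (by omega) halt' (by omega), if_pos rfl]
    · have hia' : i < a := by omega
      rw [hscan' i h1 (by omega), hpres i (by omega) hia, hpresP i (by omega) hia]
      exact hinv i h1 hia'

-- A's crear_m is the first component of B's fill
theorem fold_fst (enemigos calcular_muertos : List Int) (l : List Int) :
    ∀ (M P : List Int),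
      (l.foldl (crearMPStep enemigos calcular_muertos) (M, P)).1 =
        l.foldl (crearMStep enemigos calcular_muertos) M := by
  induction l with
  | nil => intro M P; rfl
  | cons x xs ih =>
    intro M P
    simp only [List.foldl_cons]
    have hstep : crearMStep enemigos calcular_muertos M x = (crearMPStep enemigos calcular_muertos (M, P) x).1 := by
      unfold crearMStep crearMPStep
      simp only
      congr 1
      exact (pairfold_fst (PySem.List.pyRange 1 x 1)
        (fun j => PySem.List.pyGetD M j 0 +
          min (PySem.List.pyGetD calcular_muertos (x - j - 1) 0) (PySem.List.pyGetD enemigos (x - 1) 0)) _ 0).symm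
    rw [hstep]
    have := ih (crearMPStep enemigos calcular_muertos (M, P) x).1 (crearMPStep enemigos calcular_muertos (M, P) x).2
    simpa using this

theorem crear_m_eq_fst (enemigos calcular_muertos : List Int) :
    crear_m enemigos calcular_muertos = (crearMP enemigos calcular_muertos).1 := by
  unfold crear_m crearMP
  exact (fold_fst enemigos calcular_muertos _ _ _).symm

-- the reconstruction loops agree when the scan over the final M equals the stored tables
theorem recLoop_eq (M P enemigos calcular_muertos : List Int) (n : Nat)
    (hinv : ∀ i : Int, 1 ≤ i → i ≤ (n : Int) →
      scanAt M enemigos calcular_muertos i = (PySem.List.pyGetD M i 0, PySem.List.pyGetD P i 0)) :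
    ∀ (fuel : Nat) (i : Int) (acc : List String), 0 ≤ i → i ≤ (n : Int) →
      recLoopA M enemigos calcular_muertos fuel i acc = recLoopB P fuel i acc := by
  intro fuel
  induction fuel with
  | zero => intro i acc _ _; rfl
  | succ fuel ih =>
    intro i acc h0 hn
    by_cases hi : i > 0
    · have hscan := hinv i (by omega) hn
      have hbound := scanAt_snd_bound M enemigos calcular_muertos i hi
      rw [hscan] at hbound
      show (if i > 0 then _ else acc) = (if i > 0 then _ else acc)
      rw [if_pos hi, if_pos hi]
      have hsteq : ((PySem.List.pyRange 1 i 1).foldl (fun (st : Int × Int) pa =>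
          let va := PySem.List.pyGetD M pa 0 +
            min (PySem.List.pyGetD calcular_muertos (i - pa - 1) 0) (PySem.List.pyGetD enemigos (i - 1) 0)
          if va > st.1 then (va, pa) else st)
          (min (PySem.List.pyGetD calcular_muertos (i - 1) 0) (PySem.List.pyGetD enemigos (i - 1) 0), 0)) =
          (PySem.List.pyGetD M i 0, PySem.List.pyGetD P i 0) := hscan
      rw [hsteq]
      have hng : ¬ (i - PySem.List.pyGetD P i 0 - 1 < 0) := by omega
      show recLoopA M enemigos calcular_muertos fuel (PySem.List.pyGetD P i 0)
          ((acc ++ ["Atacar"]) ++ List.replicate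
            (if i - PySem.List.pyGetD P i 0 - 1 < 0 then 0 else i - PySem.List.pyGetD P i 0 - 1).toNat "Cargar") =
        recLoopB P fuel (PySem.List.pyGetD P i 0)
          ((acc ++ ["Atacar"]) ++ List.replicate (i - PySem.List.pyGetD P i 0 - 1).toNat "Cargar")
      rw [if_neg hng]
      exact ih (PySem.List.pyGetD P i 0) _ hbound.1 (by omega)
    · simp only [recLoopA, recLoopB, if_neg hi]

-- ===== VERDICT (by name: the statement is the Claim_ definition above) =====
theorem rec_spec : Claim_equal_rec := by
  intro enemigos calcular_muertos _ _
  unfold Spec_rec rec rec_alt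
  simp only
  rw [crear_m_eq_fst]
  set n := enemigos.length with hn
  have hdp := dp_inv enemigos calcular_muertos n n 1
    (List.replicate (n + 1) 0) (List.replicate (n + 1) 0)
    le_rfl (by omega) (by simp) (by simp)
    (fun i h1 h2 => by omega)
  obtain ⟨hlen1, hlen2, hinv⟩ := hdp
  have hMP : crearMP enemigos calcular_muertos =
      ((PySem.List.pyRange 1 ((n : Int) + 1) 1).foldl (crearMPStep enemigos calcular_muertos)
        (List.replicate (n + 1) 0, List.replicate (n + 1) 0)) := rfl
  rw [hMP]
  congr 1
  congr 1
  exact recLoop_eq _ _ enemigos calcular_muertos n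
    (fun i h1 h2 => hinv i h1 (by omega)) (n + 1) (n : Int) [] (by omega) le_rfl
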